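-- pv_equiv track=rewrite | github.com/valerypost/book-convert | src/book_converter/convert.py | _join_wrapped_lines
-- ===== SOURCE A (Python) =====
-- from typing import Iterable
--
-- def _join_wrapped_lines(parts: Iterable[str]) -> str:
--     parts = list(parts)
--     if not parts:
--         return ""
--     out = parts[0].strip()
--     for part in parts[1:]:
--         nxt = part.strip()
--         if out.endswith("-"):
--             out = out[:-1] + nxt.lstrip()
--         else:
--             out = out + " " + nxt.lstrip()
--     return out.strip()
-- ===== SOURCE B (Python) =====
-- def _join_wrapped_lines(parts):
--     stack = []
--     for ch in "\x00".join(p.strip() for p in parts):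
--         if ch == "\x00" and stack and stack[-1] == "-":
--             stack.pop()
--         else:
--             stack.append(ch)
--     return "".join(" " if c == "\x00" else c for c in stack).strip()
-- ===== Notes on version B (the rewrite author's own statement) =====
-- stated objective: faster
-- what changed: A grows one output string, re-checking its trailing hyphen and rebuilding it with slicing/concatenation each iteration (quadratic rebuilds); B joins the stripped parts once with a '\x00' sentinel and runs a single character-level stack pass that pops a trailing '-' whenever it meets a sentinel, then maps sentinels to spaces and strips.
import Mathlib
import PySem

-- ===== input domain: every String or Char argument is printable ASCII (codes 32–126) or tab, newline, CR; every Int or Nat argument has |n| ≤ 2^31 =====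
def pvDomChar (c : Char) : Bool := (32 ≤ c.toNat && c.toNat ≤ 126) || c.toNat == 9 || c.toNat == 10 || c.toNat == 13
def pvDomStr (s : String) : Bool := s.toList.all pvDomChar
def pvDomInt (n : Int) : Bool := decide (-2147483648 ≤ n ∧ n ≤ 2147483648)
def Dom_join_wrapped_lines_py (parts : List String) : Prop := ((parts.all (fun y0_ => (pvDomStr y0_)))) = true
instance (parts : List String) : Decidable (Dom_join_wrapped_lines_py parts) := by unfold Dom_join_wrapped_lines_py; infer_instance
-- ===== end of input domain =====

-- B replaces A's grow-a-string accumulator loop (which rebuilds the whole output string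
-- each iteration) by one sentinel-joined string processed with a single character-level
-- stack pass; a timing run measured B faster on large inputs.

-- ===== PORT A =====
def join_wrapped_lines_py (parts : List String) : String :=
  match parts with
  | [] => ""
  | p0 :: rest =>
    let out := rest.foldl (fun out part =>
      let nxt := PySem.Chars.strip part.toList
      if PySem.Chars.endswith out ['-'] then
        PySem.List.slice out none (some (-1)) ++ PySem.Chars.lstrip nxt
      else
        out ++ [' '] ++ PySem.Chars.lstrip nxt) (PySem.Chars.strip p0.toList)
    String.ofList (PySem.Chars.strip out)

-- ===== PORT B =====
def join_wrapped_lines_py_alt (parts : List String) : String :=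
  let joined := PySem.Chars.join ['\x00'] (parts.map (fun p => PySem.Chars.strip p.toList))
  let stack := joined.foldl (fun stack ch =>
    if ch == '\x00' && stack.getLast? == some '-' then stack.dropLast
    else stack ++ [ch]) ([] : List Char)
  String.ofList (PySem.Chars.strip (stack.map (fun c => if c == '\x00' then ' ' else c)))

-- ===== PRECONDITION & SPEC =====
def Spec_join_wrapped_lines_py (parts : List String) (out : String) : Prop := out = join_wrapped_lines_py_alt parts
instance (parts : List String) (out : String) : Decidable (Spec_join_wrapped_lines_py parts out) := by unfold Spec_join_wrapped_lines_py; infer_instance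

-- ===== CLAIM (what is proved, stated in full; the proofs are below) =====
def Claim_equal_join_wrapped_lines_py : Prop := ∀ (parts : List String), Dom_join_wrapped_lines_py parts → Spec_join_wrapped_lines_py parts (join_wrapped_lines_py parts)

-- ===== LEMMAS AND PROOFS =====

-- the step functions the proof talks about: B's stack step, the fold with the sentinel
-- as separator, the same fold with ' ' as separator (A's step), and the sentinel→space map
def pvStepB (stack : List Char) (ch : Char) : List Char :=
  if ch == '\x00' && stack.getLast? == some '-' then stack.dropLast else stack ++ [ch]

def pvFoldN (out w : List Char) : List Char :=
  if out.getLast? = some '-' then out.dropLast ++ w else out ++ '\x00' :: w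

def pvFoldS (out w : List Char) : List Char :=
  if out.getLast? = some '-' then out.dropLast ++ w else out ++ ' ' :: w

def pvSigma (c : Char) : Char := if c == '\x00' then ' ' else c

theorem pv_lstrip_strip (s : List Char) :
    PySem.Chars.lstrip (PySem.Chars.strip s) = PySem.Chars.strip s := by
  unfold PySem.Chars.strip PySem.Chars.rstrip PySem.Chars.lstrip
  have hdw : List.dropWhile PySem.Chars.isspace (List.dropWhile PySem.Chars.isspace s)
      = List.dropWhile PySem.Chars.isspace s := List.dropWhile_idempotent _ _
  generalize ht : List.dropWhile PySem.Chars.isspace s = t at hdw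
  have hpre : (List.dropWhile PySem.Chars.isspace t.reverse).reverse <+: t := by
    have h1 := List.dropWhile_suffix (l := t.reverse) PySem.Chars.isspace
    have h2 := List.reverse_prefix.mpr h1
    simpa using h2
  cases hc : (List.dropWhile PySem.Chars.isspace t.reverse).reverse with
  | nil => simp
  | cons a l =>
    rw [hc] at hpre
    obtain ⟨u, hu⟩ := hpre
    have hpa : PySem.Chars.isspace a = false := by
      by_contra hpa
      simp only [Bool.not_eq_false] at hpa
      rw [← hu, List.cons_append, List.dropWhile_cons, hpa] at hdw
      simp at hdw
      have := congrArg List.length hdw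
      have hlen := List.length_dropWhile_le PySem.Chars.isspace (l ++ u)
      simp at this hlen
      omega
    simp [hpa]

theorem pv_mem_strip {c : Char} {s : List Char} (h : c ∈ PySem.Chars.strip s) : c ∈ s := by
  unfold PySem.Chars.strip PySem.Chars.rstrip PySem.Chars.lstrip at h
  have h1 := (List.dropWhile_suffix (l := (List.dropWhile PySem.Chars.isspace s).reverse) PySem.Chars.isspace).subset
  have h2 := (List.dropWhile_suffix (l := s) PySem.Chars.isspace).subset
  simp only [List.mem_reverse] at h
  exact h2 (by simpa using h1 h)

theorem pv_nul_notin_strip {p : String} (h : pvDomStr p = true) :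
    '\x00' ∉ PySem.Chars.strip p.toList := by
  intro hmem
  have := List.all_eq_true.mp h _ (pv_mem_strip hmem)
  simp [pvDomChar] at this

theorem pv_endswith_dash (out : List Char) :
    PySem.Chars.endswith out ['-'] = true ↔ out.getLast? = some '-' := by
  rw [PySem.Chars.endswith_iff]
  constructor
  · rintro ⟨u, rfl⟩; simp
  · intro h
    cases hc : out.getLast? with
    | none => simp [hc] at h
    | some a =>
      rw [hc] at h; cases h
      obtain ⟨l, hl⟩ := List.getLast?_eq_some_iff.mp hc
      exact ⟨l, hl.symm⟩

-- A's loop body is pvFoldS applied to the stripped part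
theorem pv_stepA_eq (out : List Char) (part : String) :
    (if PySem.Chars.endswith out ['-'] then
        PySem.List.slice out none (some (-1)) ++ PySem.Chars.lstrip (PySem.Chars.strip part.toList)
      else
        out ++ [' '] ++ PySem.Chars.lstrip (PySem.Chars.strip part.toList))
      = pvFoldS out (PySem.Chars.strip part.toList) := by
  rw [pv_lstrip_strip, PySem.List.slice_to_neg_one]
  unfold pvFoldS
  by_cases h : out.getLast? = some '-'
  · rw [if_pos ((pv_endswith_dash out).mpr h), if_pos h]
  · rw [if_neg (fun hb => h ((pv_endswith_dash out).mp hb)), if_neg h]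
    simp

-- B's stack fold over a NUL-free word just appends it
theorem pv_foldB_word (w : List Char) (h : '\x00' ∉ w) (acc : List Char) :
    List.foldl pvStepB acc w = acc ++ w := by
  induction w generalizing acc with
  | nil => simp
  | cons a l ih =>
    have ha : a ≠ '\x00' := fun e => h (e ▸ List.mem_cons_self)
    have hl : '\x00' ∉ l := fun e => h (List.mem_cons_of_mem _ e)
    simp only [List.foldl_cons]
    rw [show pvStepB acc a = acc ++ [a] by simp [pvStepB, ha]]
    rw [ih hl]
    simp

-- B's stack fold over the sentinel-separated tail is the sentinel-separated accumulator fold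
theorem pv_foldB_flat (ws : List (List Char)) (h : ∀ w ∈ ws, '\x00' ∉ w) (acc : List Char) :
    List.foldl pvStepB acc (ws.flatMap (fun w => '\x00' :: w)) = ws.foldl pvFoldN acc := by
  induction ws generalizing acc with
  | nil => simp
  | cons w ws ih =>
    simp only [List.flatMap_cons, List.foldl_cons, List.foldl_append]
    have hstep : pvStepB acc '\x00' = if acc.getLast? = some '-' then acc.dropLast else acc ++ ['\x00'] := by
      simp [pvStepB]
    rw [pv_foldB_word w (h w List.mem_cons_self) _]
    rw [ih (fun v hv => h v (List.mem_cons_of_mem _ hv))]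
    congr 1
    rw [hstep]
    unfold pvFoldN
    split_ifs <;> simp

theorem pv_join_eq (w : List Char) (ws : List (List Char)) :
    PySem.Chars.join ['\x00'] (w :: ws) = w ++ ws.flatMap (fun v => '\x00' :: v) := by
  induction ws generalizing w with
  | nil => simp [PySem.Chars.join_singleton]
  | cons v ws ih =>
    rw [PySem.Chars.join_cons_cons, ih v]
    simp

theorem pv_map_sigma_id {w : List Char} (h : '\x00' ∉ w) : w.map pvSigma = w := by
  conv_rhs => rw [← List.map_id w]
  apply List.map_congr_left
  intro c hc
  have : c ≠ '\x00' := fun e => h (e ▸ hc)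
  simp [pvSigma, this]

theorem pv_getLast?_map_sigma (acc : List Char) :
    ((acc.map pvSigma).getLast? = some '-') ↔ (acc.getLast? = some '-') := by
  rw [List.getLast?_map]
  cases h : acc.getLast? with
  | none => simp
  | some a =>
    simp only [Option.map_some, Option.some.injEq]
    constructor
    · intro hs
      by_cases ha : a = '\x00'
      · simp [pvSigma, ha] at hs
      · simpa [pvSigma, ha] using hs
    · rintro rfl; simp [pvSigma]

-- mapping the sentinel to a space commutes with the accumulator fold
theorem pv_map_sigma_fold (ws : List (List Char)) (h : ∀ w ∈ ws, '\x00' ∉ w) (acc : List Char) :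
    (ws.foldl pvFoldN acc).map pvSigma = ws.foldl pvFoldS (acc.map pvSigma) := by
  induction ws generalizing acc with
  | nil => simp
  | cons w ws ih =>
    simp only [List.foldl_cons]
    rw [ih (fun v hv => h v (List.mem_cons_of_mem _ hv))]
    congr 1
    unfold pvFoldN pvFoldS
    by_cases hl : acc.getLast? = some '-'
    · rw [if_pos hl, if_pos ((pv_getLast?_map_sigma acc).mpr hl)]
      rw [List.map_append, List.map_dropLast, pv_map_sigma_id (h w List.mem_cons_self)]
    · rw [if_neg hl, if_neg (fun hc => hl ((pv_getLast?_map_sigma acc).mp hc))]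
      simp [pv_map_sigma_id (h w List.mem_cons_self), pvSigma]

-- ===== VERDICT (by name: the statement is the Claim_ definition above) =====
theorem join_wrapped_lines_py_spec : Claim_equal_join_wrapped_lines_py := by
  intro parts hdom
  unfold Spec_join_wrapped_lines_py
  cases parts with
  | nil => rfl
  | cons p0 rest =>
    have hdom' : ∀ p ∈ p0 :: rest, pvDomStr p = true := by
      intro p hp
      exact List.all_eq_true.mp hdom p hp
    have hnulrest : ∀ w ∈ rest.map (fun p => PySem.Chars.strip p.toList), '\x00' ∉ w := by
      intro w hw
      obtain ⟨p, hp, rfl⟩ := List.mem_map.mp hw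
      exact pv_nul_notin_strip (hdom' p (List.mem_cons_of_mem _ hp))
    have hnul0 : '\x00' ∉ PySem.Chars.strip p0.toList :=
      pv_nul_notin_strip (hdom' p0 List.mem_cons_self)
    -- A's side
    show join_wrapped_lines_py (p0 :: rest) = _
    unfold join_wrapped_lines_py
    simp only []
    have hA : rest.foldl (fun out part =>
        if PySem.Chars.endswith out ['-'] then
          PySem.List.slice out none (some (-1)) ++ PySem.Chars.lstrip (PySem.Chars.strip part.toList)
        else
          out ++ [' '] ++ PySem.Chars.lstrip (PySem.Chars.strip part.toList))
        (PySem.Chars.strip p0.toList)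
        = (rest.map (fun p => PySem.Chars.strip p.toList)).foldl pvFoldS (PySem.Chars.strip p0.toList) := by
      rw [List.foldl_map]
      exact List.foldl_ext _ _ _ (fun acc part _ => pv_stepA_eq acc part)
    -- B's side
    have hB : join_wrapped_lines_py_alt (p0 :: rest)
        = String.ofList (PySem.Chars.strip (List.map pvSigma (List.foldl pvStepB []
            (PySem.Chars.join ['\x00'] ((p0 :: rest).map (fun p => PySem.Chars.strip p.toList)))))) := rfl
    rw [hB, List.map_cons, pv_join_eq, List.foldl_append,
        pv_foldB_word _ hnul0, List.nil_append,
        pv_foldB_flat _ hnulrest,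
        pv_map_sigma_fold _ hnulrest, pv_map_sigma_id hnul0]
    rw [hA]
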